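-- pv_equiv track=rewrite | github.com/pypi-data/pypi-mirror-306 | packages/graph-project/graph_project-0.0.1-py3-none-any.whl/graph_project/DrevoFrame.py | p_sme
-- ===== SOURCE A (Python) =====
-- def p_sme(mas):  # массив всех вершин без повторений
--
--     '''
--     :param mas: масиив строк типа:['a b c', 'f g h']
--     :return: отсортированный масив всех вершин без повторений формата ['a','b','c']
--     '''
--
--     nabor_elementov = ''  # строка, которая впосредствии будет представленна в виде отсортированого набора элементов
--     for i in range(len(mas)):
--         nabor_elementov += mas[i] + ' '  # добавляем все имеищиеся вершины в строку
--     nabor_elementov = nabor_elementov[:-1]  # удаляем последний элемент который будет ' '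
--     nabor_elementov = list(
--         set(nabor_elementov.split()))  # превращаем строку в масив и убираем при помощи setа все повторения и снова превращаем set в массив
--     return sorted(nabor_elementov)  # сортируем набор вершин для удобства в будущем
-- ===== SOURCE B (Python) =====
-- def p_sme(mas):
--     # flatten all tokens, sort with duplicates, then dedup by adjacency
--     toks = sorted(t for s in mas for t in s.split())
--     out = []
--     for t in toks:
--         if not out or out[-1] != t:
--             out.append(t)
--     return out
-- ===== Notes on version B (the rewrite author's own statement) =====
-- stated objective: simpler
-- what changed: B drops A's join-into-one-string-then-split-then-set pipeline: it flattens the per-string token lists directly, sorts the multiset of tokens, and deduplicates by comparing adjacent elements of the sorted list, so no joined string and no set are built.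
import Mathlib
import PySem

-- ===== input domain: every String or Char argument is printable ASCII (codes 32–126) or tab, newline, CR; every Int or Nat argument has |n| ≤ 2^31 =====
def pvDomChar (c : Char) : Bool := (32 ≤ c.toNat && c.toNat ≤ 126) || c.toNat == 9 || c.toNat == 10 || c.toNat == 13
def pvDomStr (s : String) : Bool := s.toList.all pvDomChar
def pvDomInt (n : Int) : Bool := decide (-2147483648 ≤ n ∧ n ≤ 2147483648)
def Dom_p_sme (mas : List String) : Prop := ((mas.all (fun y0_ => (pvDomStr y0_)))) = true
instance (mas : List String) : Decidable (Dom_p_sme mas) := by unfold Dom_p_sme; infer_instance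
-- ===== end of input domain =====

-- B avoids A's join-into-one-string/split/set pipeline: it flattens the per-string token lists, sorts, and dedups adjacent duplicates (simpler decomposition).

-- ===== PORT A =====
def p_sme (mas : List String) : List String :=
  let nabor : List Char :=
    (PySem.List.pyRange 0 (PySem.List.len mas)).foldl
      (fun acc i => acc ++ (PySem.List.pyGetD mas i "").toList ++ [' ']) []
  let nabor2 := PySem.List.slice nabor none (some (-1))
  let nabor3 := PySem.Set.ofList ((PySem.Chars.split₀ nabor2).map String.ofList)
  PySem.List.sorted nabor3 (fun x => x) false

-- ===== PORT B =====
def p_sme_alt (mas : List String) : List String :=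
  let toks := PySem.List.sorted (mas.flatMap (fun s => PySem.Str.split₀ s)) (fun x => x) false
  toks.foldl (fun out t =>
    if out.isEmpty then out ++ [t]
    else if PySem.List.pyGetD out (-1) "" ≠ t then out ++ [t]
    else out) []

-- ===== PRECONDITION & SPEC =====
def Spec_p_sme (mas : List String) (out : List String) : Prop := out = p_sme_alt mas
instance (mas : List String) (out : List String) : Decidable (Spec_p_sme mas out) := by unfold Spec_p_sme; infer_instance

-- ===== CLAIM (what is proved, stated in full; the proofs are below) =====
def Claim_equal_p_sme : Prop := ∀ (mas : List String), Dom_p_sme mas → Spec_p_sme mas (p_sme mas)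

-- ===== LEMMAS AND PROOFS =====

-- split₀.go only ever appends past acc: acc.reverse is a fixed prefix of the output
theorem split0_go_acc (s : List Char) : ∀ (cur : List Char) (acc : List (List Char)),
    PySem.Chars.split₀.go s cur acc = acc.reverse ++ PySem.Chars.split₀.go s cur [] := by
  induction s with
  | nil =>
    intro cur acc
    simp only [PySem.Chars.split₀.go]
    split_ifs <;> simp
  | cons c rest ih =>
    intro cur acc
    simp only [PySem.Chars.split₀.go]
    split_ifs with h1 h2
    · rw [ih [] acc]
    · rw [ih [] (cur.reverse :: acc), ih [] [cur.reverse]]; simp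
    · exact ih _ _

-- splitting a string at an explicit space concatenates the two token lists
theorem split0_go_space (a : List Char) : ∀ (b : List Char) (cur : List Char) (acc : List (List Char)),
    PySem.Chars.split₀.go (a ++ ' ' :: b) cur acc
      = PySem.Chars.split₀.go a cur acc ++ PySem.Chars.split₀.go b [] [] := by
  induction a with
  | nil =>
    intro b cur acc
    simp only [List.nil_append, PySem.Chars.split₀.go]
    have hsp : PySem.Chars.isspace ' ' = true := by decide
    rw [hsp]
    simp only [if_true]
    split_ifs with h
    · rw [split0_go_acc b [] acc]
    · rw [split0_go_acc b [] (cur.reverse :: acc)]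
  | cons c restA ih =>
    intro b cur acc
    simp only [List.cons_append, PySem.Chars.split₀.go]
    split_ifs with h1 h2
    · exact ih b [] acc
    · exact ih b [] _
    · exact ih b _ acc

theorem split0_append_space (a b : List Char) :
    PySem.Chars.split₀ (a ++ ' ' :: b) = PySem.Chars.split₀ a ++ PySem.Chars.split₀ b := by
  simpa [PySem.Chars.split₀] using split0_go_space a b [] []

-- the space-joined concatenation A builds (proof helper, used by the lemmas only)
def joinSp : List String → List Char
  | [] => []
  | [s] => s.toList
  | s :: t :: rest => s.toList ++ ' ' :: joinSp (t :: rest)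

theorem foldl_concat_init (mas : List String) : ∀ (init : List Char),
    mas.foldl (fun acc s => acc ++ s.toList ++ [' ']) init
      = init ++ mas.foldl (fun acc s => acc ++ s.toList ++ [' ']) [] := by
  induction mas with
  | nil => simp
  | cons s rest ih =>
    intro init
    simp only [List.foldl_cons]
    rw [ih (init ++ s.toList ++ [' ']), ih ([] ++ s.toList ++ [' '])]
    simp

theorem foldl_concat_eq_joinSp (mas : List String) (h : mas ≠ []) :
    mas.foldl (fun acc s => acc ++ s.toList ++ [' ']) [] = joinSp mas ++ [' '] := by
  induction mas with
  | nil => exact absurd rfl h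
  | cons s rest ih =>
    cases rest with
    | nil => simp [joinSp]
    | cons t r =>
      rw [List.foldl_cons]
      rw [foldl_concat_init (t :: r) ([] ++ s.toList ++ [' '])]
      rw [ih (by simp)]
      simp [joinSp]

theorem split0_joinSp (mas : List String) :
    PySem.Chars.split₀ (joinSp mas) = mas.flatMap (fun s => PySem.Chars.split₀ s.toList) := by
  induction mas with
  | nil => simp [joinSp, PySem.Chars.split₀, PySem.Chars.split₀.go]
  | cons s rest ih =>
    cases rest with
    | nil => simp [joinSp]
    | cons t r =>
      simp only [joinSp, List.flatMap_cons]
      rw [split0_append_space, ih]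
      simp

theorem str_split0_eq (s : String) :
    PySem.Str.split₀ s = (PySem.Chars.split₀ s.toList).map String.ofList := by
  have h := congrArg (List.map String.ofList) (PySem.Str.split₀_map_toList s)
  rw [List.map_map,
      show (String.ofList ∘ String.toList) = id from funext (fun x => String.ofList_toList),
      List.map_id] at h
  exact h

-- the adjacency-dedup loop as a recursion carrying the previously kept element
def dedupG : Option String → List String → List String
  | _, [] => []
  | prev, t :: r => if some t = prev then dedupG prev r else t :: dedupG (some t) r

theorem foldl_dedup_concat (r : List String) : ∀ (o : List String) (a : String),
    List.foldl (fun out t =>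
      if out.isEmpty then out ++ [t]
      else if PySem.List.pyGetD out (-1) "" ≠ t then out ++ [t]
      else out) (o ++ [a]) r = (o ++ [a]) ++ dedupG (some a) r := by
  induction r with
  | nil => intro o a; simp [dedupG]
  | cons t r ih =>
    intro o a
    rw [List.foldl_cons]
    have h1 : (o ++ [a]).isEmpty = false := by simp
    have h2 : PySem.List.pyGetD (o ++ [a]) (-1) "" = a := by
      simp [PySem.List.pyGetD, PySem.List.pyGet?, PySem.List.pyIdx?]
    by_cases hat : a = t
    · subst hat
      have hinit : (if (o ++ [a]).isEmpty then (o ++ [a]) ++ [a]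
          else if PySem.List.pyGetD (o ++ [a]) (-1) "" ≠ a then (o ++ [a]) ++ [a]
          else o ++ [a]) = o ++ [a] := by
        rw [h1, h2]; simp
      simp only [hinit]
      rw [ih o a]
      simp [dedupG]
    · have hinit : (if (o ++ [a]).isEmpty then (o ++ [a]) ++ [t]
          else if PySem.List.pyGetD (o ++ [a]) (-1) "" ≠ t then (o ++ [a]) ++ [t]
          else o ++ [a]) = (o ++ [a]) ++ [t] := by
        rw [h1, h2]; simp [hat]
      simp only [hinit]
      rw [ih (o ++ [a]) t]
      have hta : ¬ some t = some a := by simpa using fun h => hat h.symm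
      simp [dedupG, hta]

theorem foldl_dedup_eq_g (l : List String) :
    l.foldl (fun out t =>
      if out.isEmpty then out ++ [t]
      else if PySem.List.pyGetD out (-1) "" ≠ t then out ++ [t]
      else out) [] = dedupG none l := by
  cases l with
  | nil => simp [dedupG]
  | cons t r =>
    rw [List.foldl_cons]
    have hinit : (if ([] : List String).isEmpty then ([] : List String) ++ [t]
        else if PySem.List.pyGetD ([] : List String) (-1) "" ≠ t then ([] : List String) ++ [t]
        else ([] : List String)) = [t] := by simp
    simp only [hinit]
    have hcc := foldl_dedup_concat r [] t
    simp only [List.nil_append] at hcc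
    rw [hcc]
    simp [dedupG]

theorem mem_of_mem_dedupG (l : List String) : ∀ (prev : Option String) (x : String),
    x ∈ dedupG prev l → x ∈ l := by
  induction l with
  | nil => simp [dedupG]
  | cons t r ih =>
    intro prev x hx
    simp only [dedupG] at hx
    split at hx
    · exact List.mem_cons_of_mem _ (ih prev x hx)
    · rcases List.mem_cons.mp hx with h | h
      · exact h ▸ List.mem_cons_self
      · exact List.mem_cons_of_mem _ (ih (some t) x h)

theorem mem_dedupG_of_mem (l : List String) : ∀ (prev : Option String) (x : String),
    x ∈ l → some x = prev ∨ x ∈ dedupG prev l := by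
  induction l with
  | nil => simp
  | cons t r ih =>
    intro prev x hx
    simp only [dedupG]
    split
    · rename_i hsome
      rcases List.mem_cons.mp hx with h | h
      · subst h; exact Or.inl hsome
      · exact ih prev x h
    · rcases List.mem_cons.mp hx with h | h
      · subst h; exact Or.inr List.mem_cons_self
      · rcases ih (some t) x h with h' | h'
        · have : x = t := by simpa using h'
          subst this; exact Or.inr List.mem_cons_self
        · exact Or.inr (List.mem_cons_of_mem _ h')

theorem not_mem_dedupG_some (l : List String) : ∀ (t : String),
    (∀ x ∈ l, t ≤ x) → l.Pairwise (· ≤ ·) → t ∉ dedupG (some t) l := by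
  induction l with
  | nil => simp [dedupG]
  | cons a r ih =>
    intro t hle hpw
    simp only [dedupG]
    split
    · rename_i hsome
      have ha : a = t := by simpa using hsome
      subst ha
      exact ih a (fun x hx => hle x (List.mem_cons_of_mem _ hx)) (List.pairwise_cons.mp hpw).2
    · rename_i hsome
      have hat : a ≠ t := fun h => hsome (by simp [h])
      have hta : t < a := lt_of_le_of_ne (hle a List.mem_cons_self) (Ne.symm hat)
      intro hmem
      rcases List.mem_cons.mp hmem with h | h
      · exact hat h.symm
      · have htr : t ∈ r := mem_of_mem_dedupG r (some a) t h
        have : a ≤ t := (List.pairwise_cons.mp hpw).1 t htr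
        exact absurd hta (not_lt.mpr this)

theorem pairwise_lt_dedupG (l : List String) : ∀ (prev : Option String),
    l.Pairwise (· ≤ ·) → (dedupG prev l).Pairwise (· < ·) := by
  induction l with
  | nil => simp [dedupG]
  | cons t r ih =>
    intro prev hpw
    have hle := (List.pairwise_cons.mp hpw).1
    have hr := (List.pairwise_cons.mp hpw).2
    simp only [dedupG]
    split
    · exact ih prev hr
    · refine List.pairwise_cons.mpr ⟨?_, ih (some t) hr⟩
      intro x hx
      have hxr := mem_of_mem_dedupG r (some t) x hx
      have htx : t ≤ x := hle x hxr
      have hne : x ≠ t := by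
        intro h; subst h
        exact not_mem_dedupG_some r x hle hr hx
      exact lt_of_le_of_ne htx (Ne.symm hne)

-- the flattened token list both programs work on
theorem tokens_eq (mas : List String) :
    PySem.Chars.split₀
        (PySem.List.slice
          (mas.foldl (fun acc s => acc ++ s.toList ++ [' ']) []) none (some (-1)))
      = mas.flatMap (fun s => PySem.Chars.split₀ s.toList) := by
  rw [PySem.List.slice_to_neg_one]
  cases mas with
  | nil => simp [PySem.Chars.split₀, PySem.Chars.split₀.go]
  | cons s rest =>
    rw [foldl_concat_eq_joinSp (s :: rest) (by simp)]
    rw [List.dropLast_concat]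
    exact split0_joinSp (s :: rest)

-- ===== VERDICT (by name: the statement is the Claim_ definition above) =====
theorem p_sme_spec : Claim_equal_p_sme := by
  intro mas _
  unfold Spec_p_sme p_sme p_sme_alt
  -- A's index loop is a fold over mas
  rw [show ((0 : Int)) = ((0 : Nat) : Int) by simp,
      PySem.List.foldl_pyRange_pyGetD mas "" (fun acc s => acc ++ s.toList ++ [' ']) [] (by simp)]
  simp only [Int.toNat_natCast, List.drop_zero]
  rw [tokens_eq mas]
  -- B's token list is A's token list (as strings)
  have htoks : mas.flatMap (fun s => PySem.Str.split₀ s)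
      = (mas.flatMap (fun s => PySem.Chars.split₀ s.toList)).map String.ofList := by
    rw [List.map_flatMap]
    exact List.flatMap_congr (fun s _ => str_split0_eq s)
  rw [htoks]
  set T := (mas.flatMap (fun s => PySem.Chars.split₀ s.toList)).map String.ofList with hT
  -- B's loop is dedupG none over the sorted tokens
  rw [foldl_dedup_eq_g (PySem.List.sorted T (fun x => x) false)]
  -- both sides equal: sorted set = adjacent-dedup of sorted list
  have hpwle : (PySem.List.sorted T (fun x => x) false).Pairwise (· ≤ ·) :=
    PySem.List.sorted_pairwise T (fun x => x)
  have hpwlt := pairwise_lt_dedupG (PySem.List.sorted T (fun x => x) false) none hpwle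
  apply PySem.List.sorted_eq_of_perm_of_pairwise_lt
  · rw [List.perm_ext_iff_of_nodup (hpwlt.imp (fun h => ne_of_lt h)) (PySem.Set.nodup_ofList T)]
    intro x
    rw [PySem.Set.mem_ofList]
    constructor
    · intro hx
      exact (PySem.List.mem_sorted T (fun x => x) false x).mp
        (mem_of_mem_dedupG _ none x hx)
    · intro hx
      have hx' : x ∈ PySem.List.sorted T (fun x => x) false :=
        (PySem.List.mem_sorted T (fun x => x) false x).mpr hx
      rcases mem_dedupG_of_mem _ none x hx' with h | h
      · exact absurd h (by simp)
      · exact h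
  · exact hpwlt
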